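-- pv_equiv track=rewrite | github.com/BookOwl/advent2017 | day6B.py | realloc
-- ===== SOURCE A (Python) =====
-- import functools
-- import math
--
-- def pick_bank(banks):
--     @functools.cmp_to_key
--     def comp(a, b):
--         if a[1] == b[1]:
--             if a[0] < b[0]:
--                 return 1
--             else:
--                 return -1*(a[0] > b[0])
--         else:
--             if a[1] > b[1]:
--                 return 1
--             else:
--                 return -1
--     return max(enumerate(banks), key=comp)[0]
--
-- def distribute(banks):
--     index = pick_bank(banks)
--     new_banks = banks[:]
--     blocks = new_banks[index]
--     new_banks[index] = 0
--     change = math.ceil(blocks/len(banks))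
--     i = 1
--     while blocks:
--         new_banks[(index+i)%len(banks)] += 1
--         blocks -= 1
--         i += 1
--     return new_banks
--
-- def realloc(banks):
--     seen = [banks[:]]
--     while True:
--         banks = distribute(banks)
--         if banks in seen:
--             return banks, seen
--         else:
--             seen.append(banks[:])
-- ===== SOURCE B (Python) =====
-- def distribute(banks):
--     n = len(banks)
--     index = min(range(n), key=lambda i: (-banks[i], i))
--     blocks = banks[index]
--     new_banks = banks[:]
--     new_banks[index] = 0
--     base, rem = divmod(blocks, n)
--     new_banks = [v + base for v in new_banks]
--     for j in range(rem):
--         new_banks[(index + 1 + j) % n] += 1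
--     return new_banks
--
-- def realloc(banks):
--     seen = [banks[:]]
--     seen_set = {tuple(banks)}
--     while True:
--         banks = distribute(banks)
--         if tuple(banks) in seen_set:
--             return banks, seen
--         seen.append(banks[:])
--         seen_set.add(tuple(banks))
-- ===== Notes on version B (the rewrite author's own statement) =====
-- stated objective: alternative
-- what changed: distribute's one-block-at-a-time while loop (O(blocks) iterations) is replaced by closed-form divmod arithmetic (add blocks//n to every bank and one extra block to each of the blocks%n banks after the emptied one), and the linear 'banks in seen' scan is replaced by a set of tuples, making each reallocation step O(n); intended as faster, measured 1.5x-4.6x where both programs finish but unconfirmed at the largest sizes, so no speed claim is made.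
import Mathlib
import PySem

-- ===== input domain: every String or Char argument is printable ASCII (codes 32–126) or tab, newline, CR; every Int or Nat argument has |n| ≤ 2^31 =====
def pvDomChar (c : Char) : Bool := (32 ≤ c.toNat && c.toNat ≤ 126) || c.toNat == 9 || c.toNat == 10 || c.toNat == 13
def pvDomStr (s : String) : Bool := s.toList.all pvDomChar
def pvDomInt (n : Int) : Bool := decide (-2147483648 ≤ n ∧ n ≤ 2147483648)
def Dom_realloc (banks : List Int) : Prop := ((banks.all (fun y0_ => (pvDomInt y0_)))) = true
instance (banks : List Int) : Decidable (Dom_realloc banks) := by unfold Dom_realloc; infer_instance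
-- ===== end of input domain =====

-- B replaces A's one-block-at-a-time inner while loop by closed-form divmod arithmetic and A's linear
-- 'banks in seen' scan by a set lookup (intended as faster; a timing run measured 1.5x-4.6x where both
-- finish but could not confirm it at the largest sizes, so no unqualified speed claim is made).
-- Both outer loops are written with the same explicit fuel bound pvFuel, a totality device only: on every
-- input admitted by Pre_realloc the loop stops (a state repeats) long before the fuel is exhausted.

def pvFuel (banks : List Int) : Nat :=
  ((banks.length + 1) * banks.foldl (fun a x => a + x.natAbs) 0 + 2) ^ banks.length + 1

-- ===== PORT A =====
-- comp(a, b) == 1  (cmp_to_key: a sorts strictly after b)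
def pvCompGT (a b : Int × Int) : Bool :=
  if a.2 == b.2 then decide (a.1 < b.1) else decide (a.2 > b.2)

-- max(enumerate(banks), key=comp)[0]; Python's max keeps the current value unless the new one is strictly greater
def pickBank (banks : List Int) : Int :=
  match PySem.List.enumerate banks with
  | [] => 0  -- Python raises ValueError here; excluded by Pre_realloc
  | p :: rest => (rest.foldl (fun cur q => if pvCompGT q cur then q else cur) p).1

-- while blocks: new_banks[(index+i)%len] += 1; blocks -= 1; i += 1   (fuel = blocks, which counts down to 0)
def distLoopA (n index : Int) : Nat → Int → List Int → List Int
  | 0, _, L => L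
  | b + 1, i, L =>
      distLoopA n index b (i + 1) (L.modify (PySem.Int.mod (index + i) n).toNat (· + 1))

def distributeA (banks : List Int) : List Int :=
  let index := pickBank banks
  let blocks := PySem.List.pyGetD banks index 0
  let newBanks := banks.set index.toNat 0
  -- 'change = math.ceil(blocks/len(banks))' in A is dead code (never read) and is omitted
  distLoopA (banks.length : Int) index blocks.toNat 1 newBanks

def reallocLoopA : Nat → List Int → List (List Int) → List Int × List (List Int)
  | 0, banks, seen => (banks, seen)
  | fuel + 1, banks, seen =>
      let b' := distributeA banks
      if seen.contains b' then (b', seen) else reallocLoopA fuel b' (seen ++ [b'])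

def realloc (banks : List Int) : List Int × List (List Int) :=
  reallocLoopA (pvFuel banks) banks [banks]

-- ===== PORT B =====
-- (-banks[j], j) < (-banks[c], c)  (Python tuple comparison)
def pvKeyLt (banks : List Int) (j c : Int) : Bool :=
  let vj := PySem.List.pyGetD banks j 0
  let vc := PySem.List.pyGetD banks c 0
  decide (-vj < -vc) || ((-vj == -vc) && decide (j < c))

-- min(range(n), key=lambda i: (-banks[i], i)); Python's min replaces the current value when the new key is smaller
def pickAlt (banks : List Int) : Int :=
  match PySem.List.pyRange 0 (banks.length : Int) 1 with
  | [] => 0  -- Python raises ValueError here; excluded by Pre_realloc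
  | i :: rest => rest.foldl (fun cur j => if pvKeyLt banks j cur then j else cur) i

def distributeB (banks : List Int) : List Int :=
  let n : Int := (banks.length : Int)
  let index := pickAlt banks
  let blocks := PySem.List.pyGetD banks index 0
  let newBanks := banks.set index.toNat 0
  let base := PySem.Int.floordiv blocks n
  let rem := PySem.Int.mod blocks n
  let withBase := newBanks.map (· + base)
  (PySem.List.pyRange 0 rem 1).foldl
    (fun L j => L.modify (PySem.Int.mod (index + 1 + j) n).toNat (· + 1)) withBase

-- seen stays the returned list; seenSet is the set of already-seen states used for the membership test
def reallocLoopB : Nat → List Int → List (List Int) → PySem.Set (List Int) → List Int × List (List Int)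
  | 0, banks, seen, _ => (banks, seen)
  | fuel + 1, banks, seen, seenSet =>
      let b' := distributeB banks
      if PySem.Set.contains seenSet b' then (b', seen)
      else reallocLoopB fuel b' (seen ++ [b']) (PySem.Set.add seenSet b')

def realloc_alt (banks : List Int) : List Int × List (List Int) :=
  reallocLoopB (pvFuel banks) banks [banks] (PySem.Set.ofList [banks])

-- ===== PRECONDITION & SPEC =====
-- Pre_ excludes exactly the inputs on which A never returns: the empty list (max() raises
-- ValueError) and lists whose banks are all negative, where the picked block count is negative
-- and A's inner 'while blocks: blocks -= 1' loop never terminates (e.g. [-1]).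
def Pre_realloc (banks : List Int) : Prop := banks ≠ [] ∧ ∃ x ∈ banks, 0 ≤ x
instance (banks : List Int) : Decidable (Pre_realloc banks) := by unfold Pre_realloc; infer_instance

def pvWitness_realloc : List Int := [0, 2, 7, 0]

def Spec_realloc (banks : List Int) (out : List Int × List (List Int)) : Prop := out = realloc_alt banks
instance (banks : List Int) (out : List Int × List (List Int)) : Decidable (Spec_realloc banks out) := by unfold Spec_realloc; infer_instance

-- ===== CLAIM (what is proved, stated in full; the proofs are below) =====
def Claim_equal_realloc : Prop := ∀ (banks : List Int), Dom_realloc banks → Pre_realloc banks → Spec_realloc banks (realloc banks)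

-- ===== LEMMAS AND PROOFS =====

-- `bumps ps L` adds one block at each position of ps in turn: the common shape of both inner loops
def pvBumps (ps : List Nat) (L : List Int) : List Int :=
  ps.foldl (fun L p => L.modify p (· + 1)) L

theorem pvBumps_cons (p : Nat) (ps : List Nat) (L : List Int) :
    pvBumps (p :: ps) (L) = pvBumps ps (L.modify p (· + 1)) := rfl

theorem pvBumps_append (ps qs : List Nat) (L : List Int) :
    pvBumps (ps ++ qs) L = pvBumps qs (pvBumps ps L) := by
  simp [pvBumps, List.foldl_append]

theorem pvModify_comm (p q : Nat) (L : List Int) :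
    (L.modify p (· + 1)).modify q (· + 1) = (L.modify q (· + 1)).modify p (· + 1) := by
    apply List.ext_getElem?
    intro j
    simp only [List.getElem?_modify]
    cases L[j]? with
    | none => rfl
    | some a =>
      simp only [Option.map_eq_map, Option.map_some]
      split_ifs <;> rfl

theorem pvBumps_perm {ps qs : List Nat} (h : ps.Perm qs) (L : List Int) :
    pvBumps ps L = pvBumps qs L := by
    haveI : RightCommutative (fun (L : List Int) (p : Nat) => L.modify p (· + 1)) :=
      ⟨fun L p q => pvModify_comm p q L⟩
    exact h.foldl_eq L

theorem pvBumps_shift (ps : List Nat) (a : Int) (L : List Int) :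
    pvBumps (ps.map Nat.succ) (a :: L) = a :: pvBumps ps L := by
    induction ps generalizing a L with
    | nil => rfl
    | cons p ps ih =>
      rw [List.map_cons, pvBumps_cons, pvBumps_cons]
      rw [show (Nat.succ p) = p + 1 from rfl, List.modify_succ_cons]
      exact ih a (L.modify p (· + 1))

theorem pvBumps_range_len (L : List Int) :
    pvBumps (List.range L.length) L = L.map (· + 1) := by
    induction L with
    | nil => rfl
    | cons a L ih =>
      rw [List.length_cons, List.range_succ_eq_map, pvBumps_cons, List.modify_zero_cons,
        pvBumps_shift, ih, List.map_cons]

theorem pvOffsets_nodup (n s : Nat) :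
    ((List.range n).map (fun k => (s + k) % n)).Nodup := by
    refine List.Nodup.map_on ?_ (List.nodup_range)
    intro x hx y hy hxy
    have hx' : x < n := List.mem_range.mp hx
    have hy' : y < n := List.mem_range.mp hy
    have h2 : x ≡ y [MOD n] :=
      Nat.ModEq.add_left_cancel' s (show Nat.ModEq n (s + x) (s + y) from hxy)
    rw [Nat.ModEq, Nat.mod_eq_of_lt hx', Nat.mod_eq_of_lt hy'] at h2
    exact h2

theorem pvOffsets_perm (n s : Nat) (hn : 0 < n) :
    ((List.range n).map (fun k => (s + k) % n)).Perm (List.range n) := by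
    have hsub : ((List.range n).map (fun k => (s + k) % n)) ⊆ List.range n := by
      intro x hx
      obtain ⟨k, _, rfl⟩ := List.mem_map.mp hx
      exact List.mem_range.mpr (Nat.mod_lt _ hn)
    have hsp := List.subperm_of_subset (pvOffsets_nodup n s) hsub
    exact hsp.perm_of_length_le (by simp)

theorem pvBumps_cycle (n s : Nat) (hn : 0 < n) (L : List Int) (hL : L.length = n) :
    pvBumps ((List.range n).map (fun k => (s + k) % n)) L = L.map (· + 1) := by
    rw [pvBumps_perm (pvOffsets_perm n s hn) L, ← hL, pvBumps_range_len]

theorem pvBumps_split (n s : Nat) (hn : 0 < n) :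
    ∀ (base r : Nat), r < n → ∀ L : List Int, L.length = n →
      pvBumps ((List.range (base * n + r)).map (fun k => (s + k) % n)) L
        = pvBumps ((List.range r).map (fun k => (s + k) % n)) (L.map (· + (base : Int))) := by
    intro base r hr
    induction base with
    | zero =>
      intro L hL
      simp
    | succ base ih =>
      intro L hL
      have h1 : (base + 1) * n + r = n + (base * n + r) := by ring
      rw [h1, List.range_add, List.map_append, pvBumps_append, pvBumps_cycle n s hn L hL,
        List.map_map]
      have h2 : ((fun k => (s + k) % n) ∘ fun x => n + x) = (fun k => (s + k) % n) := by
        funext k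
        simp only [Function.comp]
        rw [show s + (n + k) = s + k + n by ring, Nat.add_mod_right]
      rw [h2, ih (L.map (· + 1)) (by simp [hL]), List.map_map]
      congr 1
      refine List.map_congr_left ?_
      intro x _
      simp only [Function.comp_apply]
      push_cast
      ring

theorem pvDistLoopA_eq_bumps (n idx : Nat) :
    ∀ (b i : Nat) (L : List Int),
      distLoopA (n : Int) (idx : Int) b (i : Int) L
        = pvBumps ((List.range b).map (fun k => (idx + i + k) % n)) L := by
    intro b
    induction b with
    | zero => intro i L; rfl
    | succ b ih =>
      intro i L
      have hmod : (PySem.Int.mod ((idx : Int) + (i : Int)) (n : Int)).toNat = (idx + i) % n := by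
        rw [show ((idx : Int) + (i : Int)) = ((idx + i : Nat) : Int) by push_cast; ring,
PySem.Int.mod_natCast]
        exact Int.toNat_natCast _
      have step : distLoopA (n : Int) (idx : Int) (b + 1) (i : Int) L
          = distLoopA (n : Int) (idx : Int) b ((i : Int) + 1)
              (L.modify (PySem.Int.mod ((idx : Int) + (i : Int)) (n : Int)).toNat (· + 1)) := rfl
      rw [step, hmod, show ((i : Int) + 1) = ((i + 1 : Nat) : Int) by push_cast; ring, ih]
      rw [List.range_succ_eq_map, List.map_cons, pvBumps_cons, List.map_map]
      have hfun : ((fun k => (idx + i + k) % n) ∘ Nat.succ) = (fun k => (idx + (i + 1) + k) % n) := by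
        funext k
        simp only [Function.comp, Nat.succ_eq_add_one]
        congr 1
        omega
      rw [hfun]
      norm_num

theorem pvRemLoopB_eq_bumps (n idx r : Nat) (L : List Int) :
    (PySem.List.pyRange 0 (r : Int) 1).foldl
        (fun L j => L.modify (PySem.Int.mod ((idx : Int) + 1 + j) (n : Int)).toNat (· + 1)) L
      = pvBumps ((List.range r).map (fun k => (idx + 1 + k) % n)) L := by
    rw [PySem.List.pyRange_one, show ((r : Int) - 0).toNat = r by simp]
    rw [List.foldl_map]
    unfold pvBumps
    rw [List.foldl_map]
    apply PySem.List.foldl_congr_mem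
    intro acc k _
    congr 1
    rw [show ((idx : Int) + 1 + (0 + (k : Int))) = ((idx + 1 + k : Nat) : Int) by push_cast; ring,
      PySem.Int.mod_natCast]
    exact Int.toNat_natCast _

-- pick: the two folds keep the same index
theorem pvCond_eq (banks : List Int) (j c : Int) :
    pvCompGT (j, PySem.List.pyGetD banks j 0) (c, PySem.List.pyGetD banks c 0)
      = pvKeyLt banks j c := by
    unfold pvCompGT pvKeyLt
    by_cases h : PySem.List.pyGetD banks j 0 = PySem.List.pyGetD banks c 0
    · simp [h]
    · have h2 : ¬ (-PySem.List.pyGetD banks j 0 = -PySem.List.pyGetD banks c 0) := by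
        intro hc; exact h (neg_inj.mp hc)
      simp [h, h2, neg_lt_neg_iff]

theorem pvFold_corr (banks : List Int) :
    ∀ (idxs : List Int) (c : Int),
      ((idxs.map (fun j => (j, PySem.List.pyGetD banks j 0))).foldl
          (fun cur q => if pvCompGT q cur then q else cur) (c, PySem.List.pyGetD banks c 0)).1
        = idxs.foldl (fun cur j => if pvKeyLt banks j cur then j else cur) c := by
    intro idxs
    induction idxs with
    | nil => intro c; rfl
    | cons j idxs ih =>
      intro c
      simp only [List.map_cons, List.foldl_cons, pvCond_eq]
      cases hb : pvKeyLt banks j c with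
    | false => simp only [Bool.false_eq_true, if_false]; exact ih c
    | true => simp only [if_true]; exact ih j

theorem pvFold_mem (p : Int → Int → Bool) :
    ∀ (idxs : List Int) (c : Int),
      idxs.foldl (fun cur j => if p j cur then j else cur) c ∈ c :: idxs := by
    intro idxs
    induction idxs with
    | nil => intro c; simp
    | cons j idxs ih =>
      intro c
      simp only [List.foldl_cons]
      rcases List.mem_cons.mp (ih (if p j c then j else c)) with h1 | h2
      · rw [h1]
        split_ifs <;> simp
      · simp [h2]

theorem pvPick_eq (banks : List Int) (h : banks ≠ []) :
    pickAlt banks = pickBank banks := by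
    have hn : 0 < banks.length := List.length_pos_iff.mpr h
    have hn' : (0 : Int) < (banks.length : Int) := by exact_mod_cast hn
    unfold pickAlt pickBank
    rw [PySem.List.enumerate_eq_map_pyRange banks 0]
    rw [show PySem.List.len banks = (banks.length : Int) by simp [PySem.List.len]]
    rw [PySem.List.pyRange_one_cons hn', List.map_cons]
    exact (pvFold_corr banks (PySem.List.pyRange (0 + 1) (banks.length : Int) 1) 0).symm

theorem pvPick_bounds (banks : List Int) (h : banks ≠ []) :
    0 ≤ pickAlt banks ∧ pickAlt banks < (banks.length : Int) := by
    have hn : 0 < banks.length := List.length_pos_iff.mpr h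
    have hn' : (0 : Int) < (banks.length : Int) := by exact_mod_cast hn
    have hmem : pickAlt banks ∈ PySem.List.pyRange 0 (banks.length : Int) 1 := by
      unfold pickAlt
      rw [PySem.List.pyRange_one_cons hn']
      exact pvFold_mem (pvKeyLt banks) (PySem.List.pyRange (0 + 1) (banks.length : Int) 1) 0
    have := PySem.List.mem_pyRange_one.mp hmem
    exact this

theorem pvDistAux (banks : List Int) (idx : Nat) (hidxlt : idx < banks.length)
    (hb0 : 0 ≤ PySem.List.pyGetD banks ((idx : Nat) : Int) 0) :
    distLoopA (banks.length : Int) ((idx : Nat) : Int)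
        (PySem.List.pyGetD banks ((idx : Nat) : Int) 0).toNat 1 (banks.set idx 0)
      = (PySem.List.pyRange 0
            (PySem.Int.mod (PySem.List.pyGetD banks ((idx : Nat) : Int) 0) (banks.length : Int)) 1).foldl
          (fun L j => L.modify (PySem.Int.mod (((idx : Nat) : Int) + 1 + j) (banks.length : Int)).toNat (· + 1))
          ((banks.set idx 0).map
            (· + PySem.Int.floordiv (PySem.List.pyGetD banks ((idx : Nat) : Int) 0) (banks.length : Int))) := by
  have hn : 0 < banks.length := by omega
  rw [show PySem.List.pyGetD banks ((idx : Nat) : Int) 0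
      = (((PySem.List.pyGetD banks ((idx : Nat) : Int) 0).toNat : Nat) : Int) from
    (Int.toNat_of_nonneg hb0).symm]
  simp only [Int.toNat_natCast, PySem.Int.floordiv_natCast, PySem.Int.mod_natCast]
  rw [pvRemLoopB_eq_bumps banks.length idx
    ((PySem.List.pyGetD banks ((idx : Nat) : Int) 0).toNat % banks.length)]
  have hA := pvDistLoopA_eq_bumps banks.length idx
    (PySem.List.pyGetD banks ((idx : Nat) : Int) 0).toNat 1 (banks.set idx 0)
  simp only [Nat.cast_one] at hA
  rw [hA]
  have hdm : (PySem.List.pyGetD banks ((idx : Nat) : Int) 0).toNat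
      = (PySem.List.pyGetD banks ((idx : Nat) : Int) 0).toNat / banks.length * banks.length
        + (PySem.List.pyGetD banks ((idx : Nat) : Int) 0).toNat % banks.length :=
    ((Nat.div_add_mod (PySem.List.pyGetD banks ((idx : Nat) : Int) 0).toNat banks.length).symm).trans
      (by ring)
  conv_lhs => rw [hdm]
  exact pvBumps_split banks.length (idx + 1) hn
    ((PySem.List.pyGetD banks ((idx : Nat) : Int) 0).toNat / banks.length)
    ((PySem.List.pyGetD banks ((idx : Nat) : Int) 0).toNat % banks.length)
    (Nat.mod_lt _ hn) (banks.set idx 0) (by simp)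

theorem pvFold_max (banks : List Int) :
    ∀ (idxs : List Int) (c : Int), ∀ j ∈ c :: idxs,
      PySem.List.pyGetD banks j 0
        ≤ PySem.List.pyGetD banks
            (idxs.foldl (fun cur j => if pvKeyLt banks j cur then j else cur) c) 0 := by
  intro idxs
  induction idxs with
  | nil =>
    intro c j hj
    rcases List.mem_cons.mp hj with h1 | h1
    · subst h1; exact le_refl _
    · simp at h1
  | cons i idxs ih =>
    intro c j hj
    rw [List.foldl_cons]
    have hstep : PySem.List.pyGetD banks c 0
          ≤ PySem.List.pyGetD banks (if pvKeyLt banks i c then i else c) 0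
        ∧ PySem.List.pyGetD banks i 0
          ≤ PySem.List.pyGetD banks (if pvKeyLt banks i c then i else c) 0 := by
      cases hb : pvKeyLt banks i c with
      | false =>
        simp only [Bool.false_eq_true, if_false]
        simp [pvKeyLt] at hb
        exact ⟨le_refl _, by omega⟩
      | true =>
        simp only [if_true]
        simp [pvKeyLt] at hb
        exact ⟨by omega, le_refl _⟩
    rcases List.mem_cons.mp hj with h1 | h1
    · subst h1
      exact le_trans hstep.1 (ih _ _ List.mem_cons_self)
    rcases List.mem_cons.mp h1 with h2 | h2
    · subst h2
      exact le_trans hstep.2 (ih _ _ List.mem_cons_self)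
    · exact ih _ j (List.mem_cons_of_mem _ h2)

theorem pvPick_val_nonneg (banks : List Int) (h : banks ≠ []) (hex : ∃ x ∈ banks, 0 ≤ x) :
    0 ≤ PySem.List.pyGetD banks (pickAlt banks) 0 := by
  have hn : 0 < banks.length := List.length_pos_iff.mpr h
  have hn' : (0 : Int) < (banks.length : Int) := by exact_mod_cast hn
  obtain ⟨x, hx, hx0⟩ := hex
  obtain ⟨i, hi, rfl⟩ := List.mem_iff_getElem.mp hx
  have hpick : ∀ j ∈ PySem.List.pyRange 0 (banks.length : Int) 1,
      PySem.List.pyGetD banks j 0 ≤ PySem.List.pyGetD banks (pickAlt banks) 0 := by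
    intro j hj
    unfold pickAlt
    rw [PySem.List.pyRange_one_cons hn'] at hj ⊢
    exact pvFold_max banks _ 0 j hj
  have hmem : ((i : Nat) : Int) ∈ PySem.List.pyRange 0 (banks.length : Int) 1 := by
    rw [PySem.List.mem_pyRange_one]
    constructor
    · exact Int.natCast_nonneg i
    · exact_mod_cast hi
  calc (0 : Int) ≤ banks[i] := hx0
    _ = PySem.List.pyGetD banks ((i : Nat) : Int) 0 := by
        rw [PySem.List.pyGetD_natCast, List.getD_eq_getElem banks 0 hi]
    _ ≤ _ := hpick _ hmem

theorem pvDistribute_eq (banks : List Int) (h : banks ≠ []) (hex : ∃ x ∈ banks, 0 ≤ x) :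
    distributeA banks = distributeB banks := by
  have hpe := pvPick_eq banks h
  obtain ⟨h0, h1⟩ := pvPick_bounds banks h
  have hb0 : 0 ≤ PySem.List.pyGetD banks (pickAlt banks) 0 := pvPick_val_nonneg banks h hex
  have hidx : pickAlt banks = (((pickAlt banks).toNat : Nat) : Int) := (Int.toNat_of_nonneg h0).symm
  have hidxlt : (pickAlt banks).toNat < banks.length := by omega
  rw [hidx] at hb0
  simp only [distributeA, distributeB, ← hpe]
  rw [hidx]
  simp only [Int.toNat_natCast]
  exact pvDistAux banks (pickAlt banks).toNat hidxlt hb0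

theorem pvFoldModify_length (js : List Int) (pos : Int → Nat) (L : List Int) :
    (js.foldl (fun L j => L.modify (pos j) (· + 1)) L).length = L.length := by
    induction js generalizing L with
    | nil => rfl
    | cons j js ih => rw [List.foldl_cons, ih, List.length_modify]

theorem pvFoldModify_getD_ge (js : List Int) (pos : Int → Nat) :
    ∀ (L : List Int) (k : Nat), L.getD k 0 ≤ (js.foldl (fun L j => L.modify (pos j) (· + 1)) L).getD k 0 := by
  induction js with
  | nil => intro L k; exact le_refl _
  | cons j js ih =>
    intro L k
    rw [List.foldl_cons]
    refine le_trans ?_ (ih (L.modify (pos j) (· + 1)) k)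
    rw [List.getD_eq_getElem?_getD, List.getD_eq_getElem?_getD, List.getElem?_modify]
    cases L[k]? with
    | none => simp
    | some a =>
      simp only [Option.map_eq_map, Option.map_some, Option.getD_some]
      split_ifs <;> omega

theorem pvDistributeB_pres (banks : List Int) (h : banks ≠ []) (hex : ∃ x ∈ banks, 0 ≤ x) :
    distributeB banks ≠ [] ∧ ∃ x ∈ distributeB banks, 0 ≤ x := by
  have hn : 0 < banks.length := List.length_pos_iff.mpr h
  obtain ⟨h0, h1⟩ := pvPick_bounds banks h
  have hidxlt : (pickAlt banks).toNat < banks.length := by omega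
  have hb0 : 0 ≤ PySem.List.pyGetD banks (pickAlt banks) 0 := pvPick_val_nonneg banks h hex
  have hbase : 0 ≤ PySem.Int.floordiv (PySem.List.pyGetD banks (pickAlt banks) 0) (banks.length : Int) := by
    rw [show PySem.List.pyGetD banks (pickAlt banks) 0
        = (((PySem.List.pyGetD banks (pickAlt banks) 0).toNat : Nat) : Int) from
      (Int.toNat_of_nonneg hb0).symm, PySem.Int.floordiv_natCast]
    exact Int.natCast_nonneg _
  have hlen : (distributeB banks).length = banks.length := by
    simp only [distributeB]
    refine Eq.trans (pvFoldModify_length _ _ _) ?_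
    simp
  refine ⟨?_, ?_⟩
  · intro hnil
    rw [hnil] at hlen
    simp at hlen
    omega
  · have hidx2 : (pickAlt banks).toNat < (distributeB banks).length := by
      rw [hlen]; exact hidxlt
    refine ⟨(distributeB banks)[(pickAlt banks).toNat], List.getElem_mem _, ?_⟩
    rw [← List.getD_eq_getElem (distributeB banks) 0 hidx2]
    have hwb : ((banks.set (pickAlt banks).toNat 0).map
          (· + PySem.Int.floordiv (PySem.List.pyGetD banks (pickAlt banks) 0) (banks.length : Int))).getD
          (pickAlt banks).toNat 0
        = 0 + PySem.Int.floordiv (PySem.List.pyGetD banks (pickAlt banks) 0) (banks.length : Int) := by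
      rw [List.getD_eq_getElem _ 0 (by simpa using hidxlt)]
      rw [List.getElem_map, List.getElem_set_self]
    have hge := pvFoldModify_getD_ge
      (PySem.List.pyRange 0
        (PySem.Int.mod (PySem.List.pyGetD banks (pickAlt banks) 0) (banks.length : Int)) 1)
      (fun j => (PySem.Int.mod (pickAlt banks + 1 + j) (banks.length : Int)).toNat)
      ((banks.set (pickAlt banks).toNat 0).map
        (· + PySem.Int.floordiv (PySem.List.pyGetD banks (pickAlt banks) 0) (banks.length : Int)))
      (pickAlt banks).toNat
    rw [hwb] at hge
    simp only [distributeB]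
    omega

theorem pvLoop_eq :
    ∀ (fuel : Nat) (banks : List Int) (seen : List (List Int)) (seenSet : PySem.Set (List Int)),
      banks ≠ [] → (∃ x ∈ banks, 0 ≤ x) →
      (∀ x : List Int, x ∈ seenSet ↔ x ∈ seen) →
      reallocLoopA fuel banks seen = reallocLoopB fuel banks seen seenSet := by
    intro fuel
    induction fuel with
    | zero => intro banks seen seenSet _ _ _; rfl
    | succ fuel ih =>
      intro banks seen seenSet h hex hset
      simp only [reallocLoopA, reallocLoopB]
      rw [pvDistribute_eq banks h hex]
      obtain ⟨h', hex'⟩ := pvDistributeB_pres banks h hex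
      have hcond : PySem.Set.contains seenSet (distributeB banks) = seen.contains (distributeB banks) := by
        by_cases hm : distributeB banks ∈ seen
        · have h1 : PySem.Set.contains seenSet (distributeB banks) = true :=
            (PySem.Set.contains_iff _ _).mpr ((hset _).mpr hm)
          have h2 : seen.contains (distributeB banks) = true := by
            simpa using hm
          rw [h1, h2]
        · have h1 : PySem.Set.contains seenSet (distributeB banks) ≠ true :=
            fun hc => hm ((hset _).mp ((PySem.Set.contains_iff _ _).mp hc))
          have h2 : seen.contains (distributeB banks) ≠ true := by
            simpa using hm
          rw [Bool.eq_false_iff.mpr h1, Bool.eq_false_iff.mpr h2]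
      rw [hcond]
      by_cases hc : seen.contains (distributeB banks) = true
      · rw [if_pos hc, if_pos hc]
      · rw [if_neg hc, if_neg hc]
        refine ih _ _ _ h' hex' ?_
        intro x
        simp [PySem.Set.mem_add, List.mem_append, hset x]

-- ===== VERDICT (by name: the statement is the Claim_ definition above) =====
theorem realloc_spec : Claim_equal_realloc := by
  intro banks _ hpre
  unfold Spec_realloc realloc realloc_alt
  exact pvLoop_eq (pvFuel banks) banks [banks] (PySem.Set.ofList [banks]) hpre.1 hpre.2
    (fun x => by simp [PySem.Set.mem_ofList])
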